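-- pv_equiv track=rewrite | github.com/ebookleader/Programmers | Level2/differentbit.py | solution
-- ===== SOURCE A (Python) =====
-- def solution(numbers):
--     answer = []
--     for n in numbers:
--         bitN = bin(n)[2:]
--         if n % 2 == 0:  # 짝수
--             bitN = bitN[:-1] + '1'
--         else:   # 홀수
--             # 가장 오른쪽에 잇는 0 찾기 -> 1로 바꿈 -> 다음 자리에 0으로 변경
--             if bitN.count('0') == 0:
--                 bitN = '0' + bitN
--             idx = bitN.rfind('0')
--             rear = bitN[idx+2:]
--             bitN = bitN[:idx] + '10' + rear
--         answer.append(int(bitN, 2))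
--     return answer
-- ===== SOURCE B (Python) =====
-- def solution(numbers):
--     # Pure arithmetic: for even n the answer is n+1 (set the final bit).
--     # For odd n, the answer flips the lowest 0-bit to 1 and the 1-bit below it
--     # to 0, i.e. n + 2^(p-1) where 2^p is the lowest power of two in n+1.
--     answer = []
--     for n in numbers:
--         if n % 2 == 0:
--             answer.append(n + 1)
--         else:
--             x = n + 1
--             low = 1
--             while x % 2 == 0:
--                 x //= 2
--                 low *= 2
--             answer.append(n + low // 2)
--     return answer
-- ===== Notes on version B (the rewrite author's own statement) =====
-- stated objective: simpler
-- what changed: Replaces A's binary-string surgery (bin/ count/ rfind/ splice/ int(,2)) with pure integer arithmetic: even n gives n+1, odd n gives n + low//2 where low is the largest power of two dividing n+1, found by a halving loop; no per-element string allocation or scanning.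
-- outside the precondition, e.g. on solution([-3]): A returns [11], B returns [-2]; on solution([-1]): A returns [5], B does not finish within the time limit
import Mathlib
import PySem

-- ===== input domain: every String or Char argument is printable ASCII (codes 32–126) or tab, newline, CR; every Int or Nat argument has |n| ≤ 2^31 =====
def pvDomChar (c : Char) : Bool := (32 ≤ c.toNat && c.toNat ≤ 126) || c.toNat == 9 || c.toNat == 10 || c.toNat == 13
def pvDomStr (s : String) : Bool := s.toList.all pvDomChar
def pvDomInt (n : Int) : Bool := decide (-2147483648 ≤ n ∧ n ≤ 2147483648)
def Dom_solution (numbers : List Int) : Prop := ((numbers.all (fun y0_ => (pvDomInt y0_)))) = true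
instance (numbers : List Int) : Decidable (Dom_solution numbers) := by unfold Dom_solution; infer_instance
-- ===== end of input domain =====

-- B replaces A's per-element binary-string surgery with plain integer arithmetic (simpler; same return values).

-- ===== PORT A =====
-- int(bitN, 2): hand-ported positional fold. It is exact for the strings this program feeds it
-- inside Pre_ (non-empty, '0'/'1' characters only, no sign/whitespace/underscore); the general
-- prelude parser PySem.Int.ofCharsBase? agrees there, but its parsing internals are private,
-- so this program-specific exact form is used.
def pvInt2 (s : List Char) : Int :=
  s.foldl (fun a c => 2 * a + (if c = '1' then 1 else 0)) 0

-- loop body of A: bitN = bin(n)[2:], then the even/odd string surgery, then int(bitN, 2)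
def pvStepA (n : Int) : Int :=
  let bitN := PySem.List.slice (PySem.Int.toBinChars0b n) (some 2) none
  if PySem.Int.mod n 2 == 0 then
    pvInt2 (PySem.List.slice bitN none (some (-1)) ++ ['1'])
  else
    let bitN1 := if PySem.Chars.count bitN ['0'] == 0 then '0' :: bitN else bitN
    let idx := PySem.Chars.rfind bitN1 ['0']
    let rear := PySem.List.slice bitN1 (some (idx + 2)) none
    pvInt2 (PySem.List.slice bitN1 none (some idx) ++ ['1', '0'] ++ rear)

def solution (numbers : List Int) : List Int :=
  numbers.foldl (fun answer n => answer ++ [pvStepA n]) []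

-- ===== PORT B =====
-- while x % 2 == 0: x //= 2; low *= 2   (the 'x ≠ 0' conjunct is a totality guard only:
-- Python diverges at x = 0, which no input reaches inside Pre_; everywhere else the loop
-- terminates exactly as Python does)
def pvLowLoop (x low : Int) : Int :=
  if x ≠ 0 ∧ PySem.Int.mod x 2 = 0 then pvLowLoop (PySem.Int.floordiv x 2) (low * 2) else low
termination_by x.natAbs
decreasing_by
  rename_i h
  rw [PySem.Int.floordiv_eq_ediv_of_pos (by omega : (0:Int) < 2)]
  have h2 : PySem.Int.mod x 2 = x % 2 := PySem.Int.mod_eq_emod_of_pos (by omega)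
  rw [h2] at h
  omega

-- loop body of B
def pvStepB (n : Int) : Int :=
  if PySem.Int.mod n 2 == 0 then n + 1
  else n + PySem.Int.floordiv (pvLowLoop (n + 1) 1) 2

def solution_alt (numbers : List Int) : List Int :=
  numbers.foldl (fun answer n => answer ++ [pvStepB n]) []

-- ===== PRECONDITION & SPEC =====
-- Pre_ excludes negative elements: on even negatives A raises ValueError, and on odd negatives
-- A's returned value is an accident of bin()'s '-0b' sign prefix leaking into the string surgery.
def Pre_solution (numbers : List Int) : Prop := ∀ n ∈ numbers, 0 ≤ n
instance (numbers : List Int) : Decidable (Pre_solution numbers) := by unfold Pre_solution; infer_instance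
def pvWitness_solution : List Int := [3, 4, 7, 0, 1023]

def Spec_solution (numbers : List Int) (out : List Int) : Prop := out = solution_alt numbers
instance (numbers : List Int) (out : List Int) : Decidable (Spec_solution numbers out) := by unfold Spec_solution; infer_instance

-- ===== CLAIM (what is proved, stated in full; the proofs are below) =====
def Claim_equal_solution : Prop := ∀ (numbers : List Int), Dom_solution numbers → Pre_solution numbers → Spec_solution numbers (solution numbers)

-- ===== LEMMAS AND PROOFS =====

theorem pvInt2_shift (t : List Char) (a : Int) :
    t.foldl (fun a c => 2 * a + (if c = '1' then 1 else 0)) a = a * 2 ^ t.length + pvInt2 t := by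
  induction t generalizing a with
  | nil => simp [pvInt2]
  | cons c t ih =>
    rw [List.foldl_cons, ih]
    have h2 : pvInt2 (c :: t) = (2 * 0 + (if c = '1' then 1 else 0)) * 2 ^ t.length + pvInt2 t := by
      unfold pvInt2; rw [List.foldl_cons, ih]; rfl
    rw [h2, List.length_cons]
    ring

theorem pvInt2_append (s t : List Char) :
    pvInt2 (s ++ t) = pvInt2 s * 2 ^ t.length + pvInt2 t := by
  unfold pvInt2
  rw [List.foldl_append, pvInt2_shift]
  simp [pvInt2]

-- toDigits facts
theorem toDigits_two_rec (k : Nat) (h : 2 ≤ k) :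
    Nat.toDigits 2 k = Nat.toDigits 2 (k / 2) ++ [if k % 2 = 1 then '1' else '0'] := by
  rw [Nat.toDigits_eq_if (by omega)]
  have : ¬ k < 2 := by omega
  simp only [this, if_false]
  congr 1
  have h2 : k % 2 = 0 ∨ k % 2 = 1 := by omega
  rcases h2 with h2 | h2 <;> simp [h2, Nat.digitChar]

theorem pvInt2_toDigits (k : Nat) : pvInt2 (Nat.toDigits 2 k) = (k : Int) := by
  induction k using Nat.strong_induction_on with
  | _ k ih =>
    match hk : k with
    | 0 => decide
    | 1 => decide
    | (j+2) =>
      rw [toDigits_two_rec _ (by omega), pvInt2_append, ih ((j+2)/2) (by omega)]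
      have h2 : (j+2) % 2 = 0 ∨ (j+2) % 2 = 1 := by omega
      rcases h2 with h2 | h2 <;>
        · simp [h2, pvInt2]
          omega

theorem toDigits_two_last_odd (k : Nat) (h : k % 2 = 1) :
    ∃ u, Nat.toDigits 2 k = u ++ ['1'] := by
  match k with
  | 1 => exact ⟨[], rfl⟩
  | (j+2) =>
    refine ⟨Nat.toDigits 2 ((j+2)/2), ?_⟩
    rw [toDigits_two_rec _ (by omega), h]
    simp

theorem prefixOf_single (c : Char) (w : List Char) :
    [c].isPrefixOf w = true ↔ ∃ t, w = c :: t := by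
  cases w with
  | nil => simp [List.isPrefixOf]
  | cons h t => simp [List.isPrefixOf]; exact eq_comm

theorem count_go_eq (s : List Char) (fuel acc : Nat) (hf : s.length ≤ fuel) :
    PySem.Chars.count.go ['0'] fuel s acc = acc + s.count '0' := by
  induction s generalizing fuel acc with
  | nil => cases fuel <;> simp [PySem.Chars.count.go]
  | cons c t ih =>
    match fuel with
    | fuel + 1 =>
      rw [PySem.Chars.count.go]
      by_cases hc : c = '0'
      · subst hc
        have hp : List.isPrefixOf ['0'] ('0' :: t) = true := by
          rw [prefixOf_single]; exact ⟨t, rfl⟩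
        simp only [hp, if_true]
        have : List.drop (List.length ['0']) ('0' :: t) = t := by simp
        rw [this, ih fuel (acc + 1) (by simpa using hf)]
        simp
        omega
      · have hp : List.isPrefixOf ['0'] (c :: t) = false := by
          simp [List.isPrefixOf]
          exact fun h => hc h.symm
        rw [hp, if_neg (by simp)]
        rw [ih fuel acc (by simpa using hf)]
        simp [hc]

theorem chars_count_zero (s : List Char) : PySem.Chars.count s ['0'] = s.count '0' := by
  unfold PySem.Chars.count
  simp [List.isEmpty]
  rw [count_go_eq s s.length 0 le_rfl]; omega

theorem prefixOf_zero_drop_false (v : List Char) (hv : '0' ∉ v) (m : Nat) :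
    List.isPrefixOf ['0'] (v.drop m) = false := by
  rw [Bool.eq_false_iff]
  intro h
  obtain ⟨t, ht⟩ := (prefixOf_single _ _).mp h
  have : '0' ∈ v.drop m := by rw [ht]; exact List.mem_cons_self
  exact hv (List.mem_of_mem_drop this)

theorem rfind_go_last0 (u v : List Char) (hv : '0' ∉ v) :
    ∀ i, u.length ≤ i → PySem.Chars.rfind.go (u ++ '0' :: v) ['0'] i = u.length := by
  intro i
  induction i with
  | zero =>
    intro hi
    have hu : u = [] := by
      cases u with
      | nil => rfl
      | cons a b => simp at hi
    subst hu
    rw [PySem.Chars.rfind.go]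
    have : List.isPrefixOf ['0'] ([] ++ '0' :: v) = true := by
      rw [prefixOf_single]; exact ⟨v, rfl⟩
    simp
  | succ j ih =>
    intro hi
    rw [PySem.Chars.rfind.go]
    by_cases he : u.length = j + 1
    · have : List.isPrefixOf ['0'] (List.drop (j + 1) (u ++ '0' :: v)) = true := by
        rw [← he, List.drop_append_of_le_length le_rfl]
        simp
      simp [he]
    · have hlt : u.length ≤ j := by omega
      have : List.drop (j + 1) (u ++ '0' :: v) = v.drop (j - u.length) := by
        rw [List.drop_append]
        simp [List.drop_eq_nil_of_le (by omega : u.length ≤ j + 1)]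
        rw [show j + 1 - u.length = (j - u.length) + 1 by omega]
        rfl
      rw [this, prefixOf_zero_drop_false v hv]
      simp
      exact ih hlt

theorem rfind_last0 (u v : List Char) (hv : '0' ∉ v) :
    PySem.Chars.rfind (u ++ '0' :: v) ['0'] = (u.length : Int) := by
  unfold PySem.Chars.rfind
  rw [rfind_go_last0 u v hv _ (by simp)]

theorem last_zero_decomp (s : List Char) (h : '0' ∈ s) :
    ∃ u v, s = u ++ '0' :: v ∧ '0' ∉ v := by
  induction s using List.reverseRecOn with
  | nil => simp at h
  | append_singleton xs x ih =>
    by_cases hx : x = '0'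
    · exact ⟨xs, [], by simp [hx], by simp⟩
    · have hxs : '0' ∈ xs := by
        rcases List.mem_append.mp h with h1 | h1
        · exact h1
        · simp at h1; exact absurd h1.symm hx
      obtain ⟨u, v, huv, hv⟩ := ih hxs
      exact ⟨u, v ++ [x], by simp [huv], by simp [hv]; exact fun h' => hx h'.symm⟩


theorem pvLowLoop_odd (x low : Int) (h : x % 2 = 1) : pvLowLoop x low = low := by
  rw [pvLowLoop, if_neg]
  intro ⟨h1, h2⟩
  rw [PySem.Int.mod_eq_emod_of_pos (by omega : (0:Int) < 2)] at h2
  omega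

theorem pvLowLoop_even (x low : Int) (h0 : 0 < x) (h : x % 2 = 0) :
    pvLowLoop x low = pvLowLoop (x / 2) (low * 2) := by
  rw [pvLowLoop, if_pos ⟨by omega, by rw [PySem.Int.mod_eq_emod_of_pos (by omega : (0:Int) < 2)]; omega⟩,
    PySem.Int.floordiv_eq_ediv_of_pos (by omega : (0:Int) < 2)]

theorem pvLowLoop_mul (x low c : Int) : pvLowLoop x (c * low) = c * pvLowLoop x low := by
  conv_lhs => rw [pvLowLoop]
  conv_rhs => rw [pvLowLoop]
  split_ifs with h
  · rw [show c * low * 2 = c * (low * 2) by ring]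
    exact pvLowLoop_mul (PySem.Int.floordiv x 2) (low * 2) c
  · rfl
termination_by x.natAbs
decreasing_by
  rw [PySem.Int.floordiv_eq_ediv_of_pos (by omega : (0:Int) < 2)]
  have h1 := h.1
  have h2 := h.2
  rw [PySem.Int.mod_eq_emod_of_pos (by omega : (0:Int) < 2)] at h2
  omega



theorem mod_two_cast (k : Nat) : PySem.Int.mod (k : Int) 2 = ((k % 2 : Nat) : Int) := by
  rw [PySem.Int.mod_eq_emod_of_pos (by omega : (0:Int) < 2)]
  omega

theorem bitN_cast (k : Nat) :
    PySem.List.slice (PySem.Int.toBinChars0b (k : Int)) (some 2) none = Nat.toDigits 2 k := by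
  unfold PySem.Int.toBinChars0b
  rw [if_neg (by omega)]
  rw [PySem.List.slice_from _ (by omega : (0:Int) ≤ 2)]
  simp

theorem stepB_even (k : Nat) (h : k % 2 = 0) : pvStepB (k : Int) = (k : Int) + 1 := by
  unfold pvStepB
  rw [mod_two_cast, h]
  simp

theorem stepB_odd (k : Nat) (h : k % 2 = 1) :
    pvStepB (k : Int) = (k : Int) + PySem.Int.floordiv (pvLowLoop ((k : Int) + 1) 1) 2 := by
  unfold pvStepB
  rw [mod_two_cast, h]
  simp

theorem floordiv_two_mul (a : Int) : PySem.Int.floordiv (2 * a) 2 = a := by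
  rw [PySem.Int.floordiv_eq_ediv_of_pos (by omega : (0:Int) < 2)]
  omega

theorem stepB_mod41 (k : Nat) (h : k % 4 = 1) : pvStepB (k : Int) = (k : Int) + 1 := by
  rw [stepB_odd k (by omega)]
  have h1 : pvLowLoop ((k : Int) + 1) 1 = pvLowLoop (((k : Int) + 1) / 2) 2 := by
    apply pvLowLoop_even _ _ (by omega) (by omega)
  have h2 : pvLowLoop (((k : Int) + 1) / 2) 2 = 2 := by
    apply pvLowLoop_odd
    omega
  rw [h1, h2]
  norm_num [PySem.Int.floordiv_eq_ediv_of_pos (show (0:Int) < 2 by omega)]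

theorem stepB_rec (m : Nat) (hm : m % 2 = 1) :
    pvStepB ((2 * m + 1 : Nat) : Int) = 2 * pvStepB (m : Int) + 1 := by
  rw [stepB_odd _ (by omega), stepB_odd _ hm]
  have e1 : ((2 * m + 1 : Nat) : Int) + 1 = 2 * ((m : Int) + 1) := by push_cast; ring
  set Lm := pvLowLoop ((m : Int) + 1) 1 with hLm
  have h1 : pvLowLoop (((2 * m + 1 : Nat) : Int) + 1) 1 = 2 * Lm := by
    rw [e1, pvLowLoop_even _ _ (by omega) (by omega)]
    rw [show (2 * ((m : Int) + 1)) / 2 = (m : Int) + 1 by omega]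
    have := pvLowLoop_mul ((m : Int) + 1) 1 2
    norm_num at this ⊢
    rw [this]
  -- Lm is even: m odd so m+1 is even and positive
  have h2 : Lm = 2 * pvLowLoop (((m : Int) + 1) / 2) 1 := by
    rw [hLm, pvLowLoop_even _ _ (by omega) (by omega)]
    have := pvLowLoop_mul (((m : Int) + 1) / 2) 1 2
    norm_num at this ⊢
    rw [this]
  rw [h1, floordiv_two_mul, h2, floordiv_two_mul]
  push_cast
  ring

theorem stepA_odd_eq (k : Nat) (hk : k % 2 = 1) :
    pvStepA (k : Int) =
      (let b1 := if PySem.Chars.count (Nat.toDigits 2 k) ['0'] == 0 then '0' :: Nat.toDigits 2 k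
                 else Nat.toDigits 2 k
       let idx := PySem.Chars.rfind b1 ['0']
       pvInt2 (PySem.List.slice b1 none (some idx) ++ ['1', '0'] ++
               PySem.List.slice b1 (some (idx + 2)) none)) := by
  unfold pvStepA
  rw [bitN_cast, mod_two_cast, hk]
  norm_num

theorem odd_core (b1 u v : List Char) (hb1 : b1 = u ++ '0' :: v) (hv : '0' ∉ v) :
    pvInt2 (PySem.List.slice b1 none (some (PySem.Chars.rfind b1 ['0'])) ++ ['1', '0'] ++
            PySem.List.slice b1 (some (PySem.Chars.rfind b1 ['0'] + 2)) none) =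
    pvInt2 (u ++ ['1', '0'] ++ v.drop 1) := by
  subst hb1
  rw [rfind_last0 u v hv]
  rw [PySem.List.slice_to _ (by omega : (0:Int) ≤ (u.length : Int))]
  rw [show ((u.length : Int) + 2) = ((u.length + 2 : Nat) : Int) by push_cast; ring]
  rw [PySem.List.slice_from _ (by omega)]
  rw [Int.toNat_natCast, Int.toNat_natCast]
  rw [List.take_left, List.drop_append]
  congr 2
  rw [List.drop_eq_nil_of_le (by omega), show u.length + 2 - u.length = 2 by omega]
  simp

theorem stepA_even (k : Nat) (h : k % 2 = 0) (h1 : 1 ≤ k) : pvStepA (k : Int) = (k : Int) + 1 := by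
  unfold pvStepA
  rw [bitN_cast, mod_two_cast, h]
  norm_num
  rw [PySem.List.slice_to_neg_one]
  rw [toDigits_two_rec k (by omega), h]
  norm_num
  rw [pvInt2_append, pvInt2_toDigits]
  have : k = 2 * (k / 2) := by omega
  simp [pvInt2]
  omega

theorem stepA_mod41 (k : Nat) (h : k % 4 = 1) (h5 : 5 ≤ k) : pvStepA (k : Int) = (k : Int) + 1 := by
  rw [stepA_odd_eq k (by omega)]
  have hrec1 : Nat.toDigits 2 k = Nat.toDigits 2 (k / 2) ++ ['1'] := by
    rw [toDigits_two_rec k (by omega), show k % 2 = 1 by omega]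
    simp
  have hrec2 : Nat.toDigits 2 (k / 2) = Nat.toDigits 2 (k / 4) ++ ['0'] := by
    rw [toDigits_two_rec (k / 2) (by omega), show k / 2 % 2 = 0 by omega,
        Nat.div_div_eq_div_mul]
    simp
  have hbit : Nat.toDigits 2 k = Nat.toDigits 2 (k / 4) ++ '0' :: ['1'] := by
    rw [hrec1, hrec2]; simp
  have hcnt : ¬ (PySem.Chars.count (Nat.toDigits 2 k) ['0'] == 0) = true := by
    rw [chars_count_zero, hbit]
    simp
  simp only [hcnt, if_false, Bool.false_eq_true]
  rw [odd_core _ _ _ hbit (by simp)]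
  simp only [List.drop_succ_cons, List.drop_nil]
  rw [List.append_nil, pvInt2_append, pvInt2_toDigits]
  have : k = 4 * (k / 4) + 1 := by omega
  simp [pvInt2]
  omega

theorem stepA_rec (m : Nat) (hm : m % 2 = 1) :
    pvStepA ((2 * m + 1 : Nat) : Int) = 2 * pvStepA (m : Int) + 1 := by
  rw [stepA_odd_eq _ (by omega), stepA_odd_eq m hm]
  have hbitk : Nat.toDigits 2 (2 * m + 1) = Nat.toDigits 2 m ++ ['1'] := by
    rw [toDigits_two_rec _ (by omega), show (2 * m + 1) % 2 = 1 by omega,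
        show (2 * m + 1) / 2 = m by omega]
    simp
  have hcnt : PySem.Chars.count (Nat.toDigits 2 (2 * m + 1)) ['0'] =
      PySem.Chars.count (Nat.toDigits 2 m) ['0'] := by
    rw [chars_count_zero, chars_count_zero, hbitk]
    simp
  set b1m := (if PySem.Chars.count (Nat.toDigits 2 m) ['0'] == 0 then '0' :: Nat.toDigits 2 m
              else Nat.toDigits 2 m) with hb1m
  have hb1k : (if PySem.Chars.count (Nat.toDigits 2 (2 * m + 1)) ['0'] == 0 then
                '0' :: Nat.toDigits 2 (2 * m + 1) else Nat.toDigits 2 (2 * m + 1)) =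
      b1m ++ ['1'] := by
    rw [hcnt, hb1m]
    by_cases hc : PySem.Chars.count (Nat.toDigits 2 m) ['0'] == 0 <;> simp [hc, hbitk]
  have hmem : '0' ∈ b1m := by
    rw [hb1m]
    by_cases hc : PySem.Chars.count (Nat.toDigits 2 m) ['0'] == 0
    · simp [hc]
    · rw [if_neg hc]
      rw [chars_count_zero] at hc
      have : 0 < List.count '0' (Nat.toDigits 2 m) := by
        simp at hc
        omega
      exact List.count_pos_iff.mp this
  obtain ⟨u, v, huv, hv⟩ := last_zero_decomp b1m hmem
  -- v is nonempty since b1m ends with '1'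
  obtain ⟨w, hw⟩ := toDigits_two_last_odd m hm
  have hlast : b1m.getLast? = some '1' := by
    rw [hb1m]
    split_ifs with hc
    · rw [hw, show '0' :: (w ++ ['1']) = ('0' :: w) ++ ['1'] from by simp]
      exact List.getLast?_concat
    · rw [hw]
      exact List.getLast?_concat
  obtain ⟨c0, v', hv'⟩ : ∃ c0 v', v = c0 :: v' := by
    cases hvv : v with
    | nil =>
      exfalso
      rw [huv, hvv] at hlast
      rw [show u ++ ['0'] = u ++ ['0'] from rfl] at hlast
      simp at hlast
    | cons a b => exact ⟨a, b, rfl⟩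
  have hk1 : b1m ++ ['1'] = u ++ '0' :: (v ++ ['1']) := by rw [huv]; simp
  rw [hb1k, odd_core _ _ _ hk1 (by simp [hv]), odd_core _ _ _ huv hv]
  rw [hv']
  simp only [List.cons_append, List.drop_succ_cons, List.drop_zero]
  rw [show u ++ ['1', '0'] ++ (v' ++ ['1']) = (u ++ ['1', '0'] ++ v') ++ ['1'] by simp]
  rw [pvInt2_append]
  simp [pvInt2]
  ring

theorem pvStep_eq (k : Nat) : pvStepA (k : Int) = pvStepB (k : Int) := by
  induction k using Nat.strong_induction_on with
  | _ k ih =>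
    by_cases h2 : k % 2 = 0
    · by_cases h0 : k = 0
      · subst h0; decide
      · rw [stepA_even k h2 (by omega), stepB_even k h2]
    · by_cases h1 : k = 1
      · subst h1
        have hb : pvStepB ((1 : Nat) : Int) = 2 := by
          rw [stepB_odd 1 (by omega), show ((1:Nat):Int) + 1 = 2 from by norm_num,
              pvLowLoop_even 2 1 (by omega) (by norm_num),
              show (2:Int) / 2 = 1 from by norm_num, pvLowLoop_odd _ _ (by norm_num),
              PySem.Int.floordiv_eq_ediv_of_pos (by omega : (0:Int) < 2)]
          norm_num
        rw [hb]
        decide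
      · by_cases h4 : k % 4 = 1
        · rw [stepA_mod41 k h4 (by omega), stepB_mod41 k h4]
        · have hm : k = 2 * (k / 2) + 1 := by omega
          have hodd : (k / 2) % 2 = 1 := by omega
          rw [hm, stepA_rec _ hodd, stepB_rec _ hodd, ih (k / 2) (by omega)]

-- ===== VERDICT (by name: the statement is the Claim_ definition above) =====
theorem solution_spec : Claim_equal_solution := by
  intro numbers _ hpre
  unfold Spec_solution solution solution_alt
  rw [PySem.List.foldl_append_singleton_eq_map, PySem.List.foldl_append_singleton_eq_map]
  refine List.map_congr_left ?_
  intro n hn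
  obtain ⟨k, rfl⟩ := Int.eq_ofNat_of_zero_le (hpre n hn)
  exact pvStep_eq k
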